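-- pv_equiv track=rewrite | github.com/Rahel-Meyer/Fault-tolerant-Database-Data-Filters | PrefixRedundancy.py | cal_prefixes_double_chars
-- ===== SOURCE A (Python) =====
-- from collections import defaultdict
--
-- def cal_prefixes_double_chars(data, k, d):
--     """calculates prefix filter as key-value dictionary with chars d times (redundant)
--         param: data []
--         param: k (int) number of chars per prefix
--         param: d (int) number of times to double char
--         return: prefix filter (dictionary)
--     """
--     prefixes = defaultdict(list)
--
--     for item in data:
--         if len(item) >= k:
--             prefix = item.split('|')[0][:k]
--             prefix_double = ''.join(char * d for char in prefix)
--             prefixes[prefix_double].append(item)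
--
--     return dict(prefixes)
-- ===== SOURCE B (Python) =====
-- def _double_key(item, k, d):
--     return ''.join(c * d for c in item.split('|')[0][:k])
--
-- def cal_prefixes_double_chars(data, k, d):
--     keyed = [(_double_key(item, k, d), item) for item in data if len(item) >= k]
--     keys = list(dict.fromkeys(key for key, _ in keyed))
--     return {key: [it for kk, it in keyed if kk == key] for key in keys}
-- ===== Notes on version B (the rewrite author's own statement) =====
-- stated objective: alternative
-- what changed: Replaces the incremental defaultdict bucketing with a two-phase pipeline: first build the filtered (key, item) pair list, then dedup the keys in first-occurrence order and assemble each group by a per-key scan of the pair list.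
import Mathlib
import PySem

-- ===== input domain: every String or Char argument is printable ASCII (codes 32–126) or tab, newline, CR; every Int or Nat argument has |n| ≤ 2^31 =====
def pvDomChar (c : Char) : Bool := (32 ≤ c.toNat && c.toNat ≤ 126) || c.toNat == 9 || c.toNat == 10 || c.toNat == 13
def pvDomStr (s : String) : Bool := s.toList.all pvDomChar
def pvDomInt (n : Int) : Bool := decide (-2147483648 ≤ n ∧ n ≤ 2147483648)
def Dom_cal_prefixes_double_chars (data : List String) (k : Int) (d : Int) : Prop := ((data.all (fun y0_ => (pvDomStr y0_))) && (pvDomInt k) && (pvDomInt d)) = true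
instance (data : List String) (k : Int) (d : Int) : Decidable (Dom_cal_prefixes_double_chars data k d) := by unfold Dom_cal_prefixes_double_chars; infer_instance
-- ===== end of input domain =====

-- B replaces A's incremental defaultdict bucketing with a two-phase pipeline (build the keyed
-- pair list once, then dedup keys and gather each group by a per-key scan); same result, no speed claim.

-- the doubled-char prefix key ''.join(char * d for char in item.split('|')[0][:k]),
-- identical source code in A and B (inline in A, the helper _double_key in B):
-- split? is exact for sep = "|" ≠ "" (never none); char * d is List.replicate d.toNat
-- (exact: Python yields '' for d ≤ 0, and toNat sends d ≤ 0 to 0).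
def pvKey (item : String) (k d : Int) : String :=
  let pre := PySem.Str.slice (PySem.List.pyGetD ((PySem.Str.split? item "|").getD []) 0 "") none (some k)
  PySem.Str.join "" (pre.toList.map (fun c => String.ofList (List.replicate d.toNat c)))

-- ===== PORT A =====
def cal_prefixes_double_chars (data : List String) (k : Int) (d : Int) : List (String × List String) :=
  (data.foldl
    (fun (prefixes : PySem.Dict String (List String)) item =>
      if k ≤ PySem.Str.len item then
        prefixes.modify (pvKey item k d) [] (fun l => l ++ [item])  -- prefixes[prefix_double].append(item)
      else prefixes)
    PySem.Dict.empty).items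

-- ===== PORT B =====
def cal_prefixes_double_chars_alt (data : List String) (k : Int) (d : Int) : List (String × List String) :=
  let keyed := (data.filter (fun item => decide (k ≤ PySem.Str.len item))).map
    (fun item => (pvKey item k d, item))
  let keys := PySem.List.dedup (keyed.map (fun p => p.1))
  keys.map (fun key => (key, (keyed.filter (fun p => p.1 == key)).map (fun p => p.2)))

-- ===== PRECONDITION & SPEC =====
def Spec_cal_prefixes_double_chars (data : List String) (k : Int) (d : Int) (out : List (String × List String)) : Prop := out = cal_prefixes_double_chars_alt data k d
instance (data : List String) (k : Int) (d : Int) (out : List (String × List String)) : Decidable (Spec_cal_prefixes_double_chars data k d out) := by unfold Spec_cal_prefixes_double_chars; infer_instance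

-- ===== CLAIM (what is proved, stated in full; the proofs are below) =====
def Claim_equal_cal_prefixes_double_chars : Prop := ∀ (data : List String) (k : Int) (d : Int), Dom_cal_prefixes_double_chars data k d → Spec_cal_prefixes_double_chars data k d (cal_prefixes_double_chars data k d)

-- ===== LEMMAS AND PROOFS =====



-- A's loop over data, restricted to its guarded branch, is the fold of the modify-append step
-- over B's keyed pair list.
theorem pv_foldA_eq_foldl_keyed (data : List String) (k d : Int) :
    data.foldl
      (fun (prefixes : PySem.Dict String (List String)) item =>
        if k ≤ PySem.Str.len item then
          prefixes.modify (pvKey item k d) [] (fun l => l ++ [item])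
        else prefixes)
      PySem.Dict.empty
    = ((data.filter (fun item => decide (k ≤ PySem.Str.len item))).map
        (fun item => (pvKey item k d, item))).foldl
        (fun (dd : PySem.Dict String (List String)) p => dd.modify p.1 [] (fun l => l ++ [p.2]))
        PySem.Dict.empty := by
  rw [List.foldl_map, List.foldl_filter]
  simp

-- ===== VERDICT (by name: the statement is the Claim_ definition above) =====
-- ===== VERDICT (by name: the statement is the Claim_ definition above) =====
theorem cal_prefixes_double_chars_spec : Claim_equal_cal_prefixes_double_chars := by
  intro data k d _
  show cal_prefixes_double_chars data k d = cal_prefixes_double_chars_alt data k d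
  unfold cal_prefixes_double_chars cal_prefixes_double_chars_alt
  rw [pv_foldA_eq_foldl_keyed]
  set keyed := (data.filter (fun item => decide (k ≤ PySem.Str.len item))).map
    (fun item => (pvKey item k d, item)) with hkeyed
  have hnodup : (keyed.foldl
      (fun (dd : PySem.Dict String (List String)) p => dd.modify p.1 [] (fun l => l ++ [p.2]))
      PySem.Dict.empty).keys.Nodup :=
    PySem.Dict.nodup_keys_foldl_modify_key keyed (fun p => p.1) []
      (fun _ p => fun l => l ++ [p.2]) PySem.Dict.empty (by simp)
  rw [PySem.Dict.items_eq_map_keys _ hnodup []]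
  rw [PySem.Dict.keys_foldl_modify_key keyed (fun p => p.1) []
      (fun _ p => fun l => l ++ [p.2]) PySem.Dict.empty]
  simp only [PySem.Dict.keys_empty, PySem.Set.update_nil_left, PySem.List.dedup_eq_ofList]
  refine List.map_congr_left (fun key _ => ?_)
  rw [PySem.Dict.getD_foldl_modify_append keyed PySem.Dict.empty key]
  simp [PySem.Dict.getD_empty]
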